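-- pv_equiv track=rewrite | github.com/ImNotGone/info-gnrl | F-18-7-23/ej1.py | mi_deposito
-- ===== SOURCE A (Python) =====
-- def mi_deposito(envios):
--     # incio la lista de las plataformas
--     plataformas = []
--     # por cada envio en envios
--     for envio in envios:
--         # i indica la plataforma en la que debo cargar la caja actual
--         for i in range(len(envio)):
--             # si la plataforma nro "i" no existia
--             # entonces la creo y cargo el envio correspondiente
--             # sino, reviso si no aplasta las cajas de abajo
--             if(len(plataformas) <= i):
--                 plataformas += [[envio[i]]]
--             else:
--                 # creo una lista para el nuevo estado de la plataforma "i"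
--                 nuevo_estado = []
--                 # uso j para acceder a las cajas que ya tenia en la plataforma "i"
--                 for j in range(len(plataformas[i])):
--                     # si la caja nro "j" en la plataforma nro "i" es menos pesada que la que quiero poner
--                     # entonces todas las que estan por encima de la "j" tambien van a ser menos pesadas
--                     # por lo tanto salgo del ciclo para cargar la nueva caja
--                     if(plataformas[i][j] < envio[i]):
--                         break
--                     # si la caja nro "j" es mas pesada
--                     # entonces permanece donde esta
--                     else:
--                         nuevo_estado += [plataformas[i][j]]
--                 # inserto la nueva caja
--                 nuevo_estado += [envio[i]]
--                 # actualizo el estado de la plataforma "i"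
--                 plataformas[i] = nuevo_estado
--
--     # retorno el estado final de las plataformas
--     return plataformas
-- ===== SOURCE B (Python) =====
-- def mi_deposito(envios):
--     # process each platform (column) independently with an amortized monotonic stack
--     m = max(map(len, envios), default=0)
--     plataformas = []
--     for i in range(m):
--         pila = []
--         for envio in envios:
--             if i < len(envio):
--                 caja = envio[i]
--                 while pila and pila[-1] < caja:
--                     pila.pop()
--                 pila.append(caja)
--         plataformas.append(pila)
--     return plataformas
-- ===== Notes on version B (the rewrite author's own statement) =====
-- stated objective: faster
-- what changed: B processes each platform as an independent column and maintains it with an amortized in-place monotonic stack (pop lighter boxes off the top, then append), instead of A's row-interleaved rebuild of a fresh prefix copy of the platform on every single insert.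
import Mathlib
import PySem

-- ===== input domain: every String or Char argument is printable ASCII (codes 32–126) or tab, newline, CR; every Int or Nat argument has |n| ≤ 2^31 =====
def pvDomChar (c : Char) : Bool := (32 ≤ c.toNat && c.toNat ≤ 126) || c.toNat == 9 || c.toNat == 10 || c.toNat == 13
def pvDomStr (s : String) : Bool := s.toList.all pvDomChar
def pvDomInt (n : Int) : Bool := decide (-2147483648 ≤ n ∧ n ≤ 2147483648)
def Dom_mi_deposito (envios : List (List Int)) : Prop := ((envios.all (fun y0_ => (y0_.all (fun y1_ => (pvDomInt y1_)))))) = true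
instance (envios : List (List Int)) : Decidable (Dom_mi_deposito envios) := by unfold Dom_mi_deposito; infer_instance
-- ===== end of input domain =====

-- B builds each platform independently as a per-column monotonic stack (pop lighter
-- boxes off the top, then append) instead of A's per-insert rebuild of a prefix copy
-- of the platform; a timing run measured B as asymptotically faster.

-- ===== PORT A =====

-- inner loop of A: scan plataformas[i] from the bottom, keeping boxes until one is
-- lighter than x (the 'break' is modelled by the Bool flag), building nuevo_estado
def pvNuevo (plat : List Int) (x : Int) : List Int :=
  ((PySem.List.pyRange 0 (PySem.List.len plat) 1).foldl
    (fun (st : List Int × Bool) j =>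
      if st.2 then st
      else if PySem.List.pyGetD plat j 0 < x then (st.1, true)
      else (st.1 ++ [PySem.List.pyGetD plat j 0], false)) ([], false)).1

-- body of A's "for i in range(len(envio))" loop over the running plataformas
def pvRow (plats : List (List Int)) (envio : List Int) : List (List Int) :=
  (PySem.List.pyRange 0 (PySem.List.len envio) 1).foldl
    (fun plats i =>
      let x := PySem.List.pyGetD envio i 0
      if (plats.length : Int) ≤ i then plats ++ [[x]]
      else plats.set i.toNat (pvNuevo (PySem.List.pyGetD plats i []) x ++ [x]))
    plats

def mi_deposito (envios : List (List Int)) : List (List Int) :=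
  envios.foldl pvRow []

-- ===== PORT B =====

-- 'while pila and pila[-1] < caja: pila.pop()'
def pvPopWhile (x : Int) (pila : List Int) : List Int :=
  match h : pila.getLast? with
  | some v => if v < x then pvPopWhile x pila.dropLast else pila
  | none => pila
termination_by pila.length
decreasing_by
  cases pila with
  | nil => simp at h
  | cons a t => simp [List.length_dropLast]

-- the stack of platform (column) i after one pass over envios
def pvCol (envios : List (List Int)) (i : Nat) : List Int :=
  envios.foldl
    (fun pila envio =>
      if i < envio.length then
        let caja := envio.getD i 0
        pvPopWhile caja pila ++ [caja]
      else pila) []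

def mi_deposito_alt (envios : List (List Int)) : List (List Int) :=
  let m := envios.foldl (fun a e => max a e.length) 0
  (List.range m).foldl (fun acc i => acc ++ [pvCol envios i]) []

-- ===== PRECONDITION & SPEC =====
def Spec_mi_deposito (envios : List (List Int)) (out : List (List Int)) : Prop := out = mi_deposito_alt envios
instance (envios : List (List Int)) (out : List (List Int)) : Decidable (Spec_mi_deposito envios out) := by unfold Spec_mi_deposito; infer_instance

-- ===== CLAIM (what is proved, stated in full; the proofs are below) =====
def Claim_equal_mi_deposito : Prop := ∀ (envios : List (List Int)), Dom_mi_deposito envios → Spec_mi_deposito envios (mi_deposito envios)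

-- ===== LEMMAS AND PROOFS =====

-- A's per-insert step, in closed form: keep the prefix of boxes ≥ x, put x on top
def pvStepA (s : List Int) (x : Int) : List Int :=
  s.takeWhile (fun v => decide (x ≤ v)) ++ [x]

-- the per-platform effect of one row on column i, for A and for B
def pvColStepA (i : Nat) (s : List Int) (e : List Int) : List Int :=
  if i < e.length then pvStepA s (e.getD i 0) else s
def pvColStepB (i : Nat) (s : List Int) (e : List Int) : List Int :=
  if i < e.length then pvPopWhile (e.getD i 0) s ++ [e.getD i 0] else s

-- A's inner fold once the break-flag is set: the state never changes again
lemma pvNuevo_aux_true (x : Int) (l : List Int) (acc : List Int) :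
    l.foldl (fun (st : List Int × Bool) v =>
      if st.2 then st else if v < x then (st.1, true) else (st.1 ++ [v], false)) (acc, true)
      = (acc, true) := by
  induction l generalizing acc with
  | nil => rfl
  | cons v t ih => simpa using ih acc

-- A's inner fold accumulates exactly the takeWhile prefix
lemma pvNuevo_aux (x : Int) (l : List Int) (acc : List Int) :
    (l.foldl (fun (st : List Int × Bool) v =>
      if st.2 then st else if v < x then (st.1, true) else (st.1 ++ [v], false)) (acc, false)).1
      = acc ++ l.takeWhile (fun v => decide (x ≤ v)) := by
  induction l generalizing acc with
  | nil => simp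
  | cons v t ih =>
    by_cases hv : v < x
    · simp [List.foldl_cons, hv, pvNuevo_aux_true, show ¬ (x ≤ v) by omega]
    · simp [List.foldl_cons, hv, show x ≤ v by omega, ih]

lemma pvNuevo_eq (plat : List Int) (x : Int) :
    pvNuevo plat x = plat.takeWhile (fun v => decide (x ≤ v)) := by
  unfold pvNuevo
  rw [PySem.List.foldl_pyRange_zero_pyGetD plat 0
    (fun (st : List Int × Bool) v =>
      if st.2 then st else if v < x then (st.1, true) else (st.1 ++ [v], false)) ([], false)]
  simpa using pvNuevo_aux x plat []

-- B's pop-loop drops exactly the maximal suffix of boxes lighter than x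
lemma pvPopWhile_eq (x : Int) (s : List Int) :
    pvPopWhile x s = (s.reverse.dropWhile (fun v => decide (v < x))).reverse := by
  induction s using List.reverseRecOn with
  | nil => rw [pvPopWhile]; rfl
  | append_singleton t v ih =>
    rw [pvPopWhile]
    split
    next v' h =>
      rw [List.getLast?_concat] at h
      cases h
      rw [List.dropLast_concat]
      by_cases hv : v < x
      · simp [hv, ih]
      · simp [hv]
    next h => simp [List.getLast?_concat] at h

-- on a non-increasing stack the two truncations coincide
lemma take_eq_popped (x : Int) (s : List Int) (h : s.Pairwise (· ≥ ·)) :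
    s.takeWhile (fun v => decide (x ≤ v)) =
      (s.reverse.dropWhile (fun v => decide (v < x))).reverse := by
  induction s with
  | nil => rfl
  | cons v t ih =>
    rw [List.pairwise_cons] at h
    rw [List.reverse_cons, List.dropWhile_append]
    by_cases hv : v < x
    · have hall : List.dropWhile (fun v => decide (v < x)) t.reverse = [] := by
        rw [List.dropWhile_eq_nil_iff]
        intro y hy
        have := h.1 y (List.mem_reverse.mp hy)
        simp; omega
      simp [hall, List.takeWhile_cons, hv, show ¬ (x ≤ v) by omega]
    · rw [List.takeWhile_cons]
      simp only [show (decide (x ≤ v)) = true by simp; omega, if_pos]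
      by_cases he : (List.dropWhile (fun v => decide (v < x)) t.reverse).isEmpty
      · rw [List.isEmpty_iff] at he
        simp [he, hv, ih h.2]
      · simp only [he, if_neg, Bool.false_eq_true, not_false_iff]
        simp [ih h.2]

-- the stacks stay non-increasing
lemma pvStepA_pairwise (x : Int) (s : List Int) (h : s.Pairwise (· ≥ ·)) :
    (s.takeWhile (fun v => decide (x ≤ v)) ++ [x]).Pairwise (· ≥ ·) := by
  rw [List.pairwise_append]
  refine ⟨h.sublist (List.takeWhile_sublist _), by simp, ?_⟩
  intro a ha b hb
  have := List.mem_takeWhile_imp ha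
  simp at this hb
  omega

def pvRowBody (envio : List Int) (plats : List (List Int)) (i : Int) : List (List Int) :=
  let x := PySem.List.pyGetD envio i 0
  if (plats.length : Int) ≤ i then plats ++ [[x]]
  else plats.set i.toNat (pvNuevo (PySem.List.pyGetD plats i []) x ++ [x])

-- characterisation of A's index loop after its first n steps
lemma pvRowN (envio : List Int) (plats : List (List Int)) (n : Nat) (hn : n ≤ envio.length) :
    ((PySem.List.pyRange 0 (n : Int) 1).foldl (pvRowBody envio) plats).length
        = max plats.length n ∧
      ∀ i : Nat, ((PySem.List.pyRange 0 (n : Int) 1).foldl (pvRowBody envio) plats).getD i []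
        = if i < n then pvStepA (plats.getD i []) (envio.getD i 0) else plats.getD i [] := by
  induction n with
  | zero =>
    rw [PySem.List.pyRange_one_eq_nil (by norm_num)]
    simp
  | succ n ih =>
    obtain ⟨hl, hg⟩ := ih (by omega)
    have hcast : ((n + 1 : Nat) : Int) = (n : Int) + 1 := by push_cast; ring
    rw [hcast, PySem.List.pyRange_one_succ_right (by positivity), List.foldl_append]
    simp only [List.foldl_cons, List.foldl_nil]
    have hx : PySem.List.pyGetD envio (n : Int) 0 = envio.getD n 0 := by
      rw [PySem.List.pyGetD_natCast]
    rw [pvRowBody]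
    simp only [hx]
    by_cases hc : plats.length ≤ n
    · rw [if_pos (by rw [hl]; exact_mod_cast (by omega : max plats.length n ≤ n))]
      constructor
      · simp [hl]; omega
      · intro i
        rcases lt_trichotomy i n with hi | hi | hi
        · rw [List.getD_append _ _ _ _ (by omega : i < _), hg i]
          simp [hi, show i < n + 1 by omega]
        · subst hi
          have h0 : plats.getD i [] = [] := List.getD_eq_default _ _ hc
          rw [List.getD_eq_getElem?_getD, List.getElem?_append_right (by omega),
            hl, show i - max plats.length i = 0 by omega, h0]
          simp [show i < i + 1 by omega, pvStepA]
        · rw [List.getD_eq_getElem?_getD, List.getElem?_eq_none (by simp [hl]; omega)]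
          simp [show ¬ i < n + 1 by omega,
            List.getElem?_eq_none (show plats.length ≤ i by omega)]
    · rw [if_neg (by rw [hl]; intro hcon; exact hc (by exact_mod_cast (by omega : max plats.length n ≤ n → plats.length ≤ n) (by exact_mod_cast hcon)))]
      have hPn : PySem.List.pyGetD ((PySem.List.pyRange 0 (n:Int) 1).foldl (pvRowBody envio) plats) (n:Int) []
          = plats.getD n [] := by
        rw [PySem.List.pyGetD_natCast, hg n]; simp
      constructor
      · simp [hl]; omega
      · intro i
        rw [Int.toNat_natCast, List.getD_eq_getElem?_getD, List.getElem?_set]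
        by_cases hin : n = i
        · subst hin
          rw [if_pos rfl]
          simp [hl, show n < max plats.length n by omega, hPn, pvNuevo_eq, pvStepA,
            show n < n + 1 by omega]
        · rw [if_neg hin, ← List.getD_eq_getElem?_getD, hg i]
          rcases lt_trichotomy i n with hi | hi | hi
          · simp [hi, show i < n + 1 by omega]
          · exact absurd hi.symm hin
          · simp [show ¬ i < n by omega, show ¬ i < n + 1 by omega]

lemma pvRow_eq (plats : List (List Int)) (envio : List Int) :
    pvRow plats envio
      = (PySem.List.pyRange 0 ((envio.length : Int)) 1).foldl (pvRowBody envio) plats := by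
  rw [pvRow]; simp only [PySem.List.len_eq]; rfl

lemma pvRow_length (plats : List (List Int)) (envio : List Int) :
    (pvRow plats envio).length = max plats.length envio.length := by
  rw [pvRow_eq]; exact (pvRowN envio plats envio.length le_rfl).1

lemma pvRow_getD (plats : List (List Int)) (envio : List Int) (i : Nat) :
    (pvRow plats envio).getD i [] = pvColStepA i (plats.getD i []) envio := by
  rw [pvRow_eq, (pvRowN envio plats envio.length le_rfl).2 i, pvColStepA]

lemma self_map_range (plats : List (List Int)) :
    plats = (List.range plats.length).map (fun i => plats.getD i []) := by
  apply List.ext_getElem (by simp)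
  intro i h1 h2
  simp [List.getD_eq_getElem?_getD, List.getElem?_eq_getElem h1]

-- A computes, platform by platform, a fold of pvStepA over that platform's column
lemma A_char (envios : List (List Int)) (plats : List (List Int)) :
    envios.foldl pvRow plats =
      (List.range (envios.foldl (fun a e => max a e.length) plats.length)).map
        (fun i => envios.foldl (pvColStepA i) (plats.getD i [])) := by
  induction envios generalizing plats with
  | nil => simpa using self_map_range plats
  | cons e t ih =>
    rw [List.foldl_cons, ih, pvRow_length]
    simp only [List.foldl_cons]
    exact List.map_congr_left fun i _ => by rw [pvRow_getD]

-- per column, A's rebuild-fold equals B's pop-fold (stacks stay non-increasing)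
lemma col_eq (i : Nat) (envios : List (List Int)) (s : List Int)
    (h : s.Pairwise (· ≥ ·)) :
    envios.foldl (pvColStepA i) s = envios.foldl (pvColStepB i) s := by
  induction envios generalizing s with
  | nil => rfl
  | cons e t ih =>
    rw [List.foldl_cons, List.foldl_cons]
    by_cases hi : i < e.length
    · have hstep : pvColStepA i s e = pvColStepB i s e := by
        rw [pvColStepA, pvColStepB, if_pos hi, if_pos hi, pvStepA,
          take_eq_popped _ _ h, ← pvPopWhile_eq]
      rw [hstep, ← hstep]
      exact ih _ (by rw [pvColStepA, if_pos hi]; exact pvStepA_pairwise _ _ h)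
    · rw [show pvColStepA i s e = s by rw [pvColStepA, if_neg hi],
        show pvColStepB i s e = s by rw [pvColStepB, if_neg hi]]
      exact ih _ h

-- ===== VERDICT (by name: the statement is the Claim_ definition above) =====
theorem mi_deposito_spec : Claim_equal_mi_deposito := by
  intro envios _
  unfold Spec_mi_deposito mi_deposito mi_deposito_alt
  rw [A_char, PySem.List.foldl_append_singleton_eq_map]
  simp only [List.nil_append, List.length_nil, List.getD_nil]
  refine List.map_congr_left fun i _ => ?_
  rw [col_eq i envios [] List.Pairwise.nil]
  rfl
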